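-- pv_equiv track=rewrite | github.com/s-tefan/python-exercises | lzw.py | vlq_decode
-- ===== SOURCE A (Python) =====
-- def vlq_decode(bytelist):
--     outlist = []
--     x = 0
--     for b in bytelist:
--         if b >= 128:
--             x = x*128 + (b-128)
--         else:
--             x = x*128 + b
--             outlist.append(x)
--             x = 0
--     return outlist
-- ===== SOURCE B (Python) =====
-- def vlq_decode(bytelist):
--     # Phase 1: partition the bytes into completed 7-bit payload chunks.
--     chunks = []
--     cur = []
--     for b in bytelist:
--         if b >= 128:
--             cur.append(b - 128)
--         else:
--             cur.append(b)
--             chunks.append(cur)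
--             cur = []
--     # a trailing unterminated chunk (cur) is discarded
--     # Phase 2: decode each chunk independently as a base-128 place-value sum.
--     return [sum(c * 128 ** k for k, c in enumerate(reversed(ch))) for ch in chunks]
-- ===== Notes on version B (the rewrite author's own statement) =====
-- stated objective: alternative
-- what changed: B splits decoding into two separate phases -- first partitioning the bytes into completed payload chunks, then decoding each chunk by a base-128 place-value sum over its reversed digits -- instead of A's single pass with one running accumulator.
import Mathlib
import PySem

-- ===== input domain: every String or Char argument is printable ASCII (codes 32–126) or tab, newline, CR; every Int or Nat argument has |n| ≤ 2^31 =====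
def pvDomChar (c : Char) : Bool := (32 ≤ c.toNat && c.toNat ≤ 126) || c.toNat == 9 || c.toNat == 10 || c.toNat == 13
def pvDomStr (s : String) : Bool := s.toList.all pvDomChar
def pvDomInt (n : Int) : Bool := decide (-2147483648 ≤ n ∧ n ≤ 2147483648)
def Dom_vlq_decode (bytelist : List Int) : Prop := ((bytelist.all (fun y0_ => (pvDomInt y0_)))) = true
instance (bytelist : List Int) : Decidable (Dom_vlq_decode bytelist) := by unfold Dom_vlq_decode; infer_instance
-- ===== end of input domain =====

-- B decodes in two separate phases (chunking, then a base-128 place-value sum per chunk)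
-- instead of A's single pass with one running accumulator; same cost, different decomposition.

-- ===== PORT A =====
def vlq_decode (bytelist : List Int) : List Int :=
  (bytelist.foldl
    (fun (s : List Int × Int) b =>
      if b ≥ 128 then (s.1, s.2 * 128 + (b - 128))
      else (s.1 ++ [s.2 * 128 + b], 0))
    ([], 0)).1

-- ===== PORT B =====
-- sum(c * 128 ** k for k, c in enumerate(reversed(ch))); p.1.toNat is exact: enumerate
-- indices from start 0 are nonnegative.
def pvDecodeChunk (ch : List Int) : Int :=
  ((PySem.List.enumerate ch.reverse 0).map (fun p => p.2 * 128 ^ p.1.toNat)).sum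

def vlq_decode_alt (bytelist : List Int) : List Int :=
  ((bytelist.foldl
    (fun (s : List (List Int) × List Int) b =>
      if b ≥ 128 then (s.1, s.2 ++ [b - 128])
      else (s.1 ++ [s.2 ++ [b]], []))
    ([], [])).1).map pvDecodeChunk

-- ===== PRECONDITION & SPEC =====
def Spec_vlq_decode (bytelist : List Int) (out : List Int) : Prop := out = vlq_decode_alt bytelist
instance (bytelist : List Int) (out : List Int) : Decidable (Spec_vlq_decode bytelist out) := by unfold Spec_vlq_decode; infer_instance

-- ===== CLAIM (what is proved, stated in full; the proofs are below) =====
def Claim_equal_vlq_decode : Prop := ∀ (bytelist : List Int), Dom_vlq_decode bytelist → Spec_vlq_decode bytelist (vlq_decode bytelist)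

-- ===== LEMMAS AND PROOFS =====

-- A's running accumulator, as a function of the pending chunk.
def pvValOf (cur : List Int) : Int := cur.foldl (fun x c => x * 128 + c) 0

lemma pvValOf_snoc (cur : List Int) (c : Int) :
    pvValOf (cur ++ [c]) = pvValOf cur * 128 + c := by
  simp [pvValOf, List.foldl_append]

lemma enumerate_shift (r : List Int) (s : Nat) :
    ((PySem.List.enumerate r ((s : Int) + 1)).map (fun p => p.2 * 128 ^ p.1.toNat)).sum
      = 128 * ((PySem.List.enumerate r (s : Int)).map (fun p => p.2 * 128 ^ p.1.toNat)).sum := by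
  induction r generalizing s with
  | nil => simp [PySem.List.enumerate_nil]
  | cons x xs ih =>
    have h1 : ((s : Int) + 1).toNat = s + 1 := by omega
    have h2 : ((s : Int)).toNat = s := by omega
    have ih' := ih (s + 1)
    push_cast at ih' ⊢
    simp only [PySem.List.enumerate_cons, List.map_cons, List.sum_cons, h1, h2]
    rw [show (s : Int) + 1 + 1 = ((s : Nat) + 1 : Nat) + 1 by push_cast; ring] at *
    rw [ih']
    ring_nf

lemma pvDecodeChunk_snoc (ch : List Int) (b : Int) :
    pvDecodeChunk (ch ++ [b]) = pvDecodeChunk ch * 128 + b := by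
  simp only [pvDecodeChunk, List.reverse_append, List.reverse_cons, List.reverse_nil,
    List.nil_append, List.cons_append, PySem.List.enumerate_cons, List.map_cons, List.sum_cons]
  have := enumerate_shift ch.reverse 0
  norm_num at this ⊢
  rw [this]; ring

lemma pvDecodeChunk_eq_valOf (ch : List Int) : pvDecodeChunk ch = pvValOf ch := by
  induction ch using List.reverseRecOn with
  | nil => simp [pvDecodeChunk, pvValOf, PySem.List.enumerate_nil]
  | append_singleton l b ih => rw [pvDecodeChunk_snoc, pvValOf_snoc, ih]

lemma vlq_loop_eq (bl : List Int) :
    ∀ (out : List Int) (chunks : List (List Int)) (cur : List Int),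
      out = chunks.map pvDecodeChunk →
      (bl.foldl
        (fun (s : List Int × Int) b =>
          if b ≥ 128 then (s.1, s.2 * 128 + (b - 128))
          else (s.1 ++ [s.2 * 128 + b], 0))
        (out, pvValOf cur)).1
      = ((bl.foldl
          (fun (s : List (List Int) × List Int) b =>
            if b ≥ 128 then (s.1, s.2 ++ [b - 128])
            else (s.1 ++ [s.2 ++ [b]], []))
          (chunks, cur)).1).map pvDecodeChunk := by
  induction bl with
  | nil => intro out chunks cur h; simpa using h
  | cons b bs ih =>
    intro out chunks cur h
    by_cases hb : b ≥ 128
    · simp only [List.foldl_cons, if_pos hb]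
      rw [show pvValOf cur * 128 + (b - 128) = pvValOf (cur ++ [b - 128]) by
        rw [pvValOf_snoc]]
      exact ih out chunks (cur ++ [b - 128]) h
    · simp only [List.foldl_cons, if_neg hb]
      rw [show (0 : Int) = pvValOf [] by simp [pvValOf]]
      apply ih
      rw [h, List.map_append]
      simp [pvDecodeChunk_eq_valOf, pvValOf_snoc]

-- ===== VERDICT (by name: the statement is the Claim_ definition above) =====
theorem vlq_decode_spec : Claim_equal_vlq_decode := by
  intro bytelist _
  unfold Spec_vlq_decode vlq_decode vlq_decode_alt
  have := vlq_loop_eq bytelist [] [] [] (by simp)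
  simpa [pvValOf] using this
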